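-- pv_equiv track=rewrite | github.com/math-programmer/python | wheel_of_fortune.py | obscurePhrase
-- ===== SOURCE A (Python) =====
-- LETTERS = "ABCDEFGHIJKLMNOPQRSTUVWXYZ"
--
-- def obscurePhrase(phrase,guessed):
--     obscured_phrase = ""
--     for letter in phrase:
--         if (letter not in guessed) and (letter in LETTERS):
--             obscured_phrase += "_"
--         else:
--             obscured_phrase += letter
--     return obscured_phrase
-- ===== SOURCE B (Python) =====
-- LETTERS = "ABCDEFGHIJKLMNOPQRSTUVWXYZ"
--
-- def obscurePhrase(phrase, guessed):
--     table = {ord(c): "_" for c in LETTERS if c not in guessed}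
--     return phrase.translate(table)
-- ===== Notes on version B (the rewrite author's own statement) =====
-- stated objective: faster
-- what changed: B precomputes a translation table over the 26-letter alphabet (letters not yet guessed mapped to '_') and applies str.translate in one table-driven pass, replacing A's per-character membership tests against guessed/LETTERS and quadratic string += accumulation.
import Mathlib
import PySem

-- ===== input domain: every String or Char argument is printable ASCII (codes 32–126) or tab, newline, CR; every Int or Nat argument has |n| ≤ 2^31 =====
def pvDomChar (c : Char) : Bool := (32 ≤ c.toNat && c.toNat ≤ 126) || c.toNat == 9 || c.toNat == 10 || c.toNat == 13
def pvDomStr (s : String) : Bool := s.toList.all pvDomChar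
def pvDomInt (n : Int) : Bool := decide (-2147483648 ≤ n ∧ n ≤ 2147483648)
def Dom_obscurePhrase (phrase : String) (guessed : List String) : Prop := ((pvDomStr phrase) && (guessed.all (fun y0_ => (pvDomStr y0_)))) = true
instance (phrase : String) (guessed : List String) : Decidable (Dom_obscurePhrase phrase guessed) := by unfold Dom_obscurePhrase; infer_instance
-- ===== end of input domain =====

-- B builds the set of still-hidden alphabet letters once (a translation table) and maps the
-- phrase through it in one table-driven pass, instead of A's per-character membership tests.

-- LETTERS = "ABCDEFGHIJKLMNOPQRSTUVWXYZ" (as its character list)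
def pvLETTERS : List Char := "ABCDEFGHIJKLMNOPQRSTUVWXYZ".toList

-- ===== PORT A =====
-- per character: if (letter not in guessed) and (letter in LETTERS): acc += "_" else acc += letter
-- ('letter in LETTERS' is a one-character substring test, which for a single character is
-- exactly character membership in pvLETTERS)
def obscurePhrase (phrase : String) (guessed : List String) : String :=
  String.ofList (phrase.toList.foldl
    (fun acc c =>
      if String.ofList [c] ∉ guessed ∧ c ∈ pvLETTERS then acc ++ ['_'] else acc ++ [c]) [])

-- ===== PORT B =====
-- table = {ord(c): "_" for c in LETTERS if c not in guessed}; return phrase.translate(table)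
def obscurePhrase_alt (phrase : String) (guessed : List String) : String :=
  let table : List Char := pvLETTERS.filter (fun c => String.ofList [c] ∉ guessed)
  String.ofList (phrase.toList.map (fun c => if c ∈ table then '_' else c))

-- ===== PRECONDITION & SPEC =====
def Spec_obscurePhrase (phrase : String) (guessed : List String) (out : String) : Prop := out = obscurePhrase_alt phrase guessed
instance (phrase : String) (guessed : List String) (out : String) : Decidable (Spec_obscurePhrase phrase guessed out) := by unfold Spec_obscurePhrase; infer_instance

-- ===== CLAIM (what is proved, stated in full; the proofs are below) =====
def Claim_equal_obscurePhrase : Prop := ∀ (phrase : String) (guessed : List String), Dom_obscurePhrase phrase guessed → Spec_obscurePhrase phrase guessed (obscurePhrase phrase guessed)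

-- ===== LEMMAS AND PROOFS =====

-- A's accumulator loop is the map of its per-character branch.
theorem obscure_foldl_eq_map (guessed : List String) :
    ∀ (l acc : List Char),
      l.foldl (fun acc c =>
        if String.ofList [c] ∉ guessed ∧ c ∈ pvLETTERS then acc ++ ['_'] else acc ++ [c]) acc
      = acc ++ l.map (fun c => if String.ofList [c] ∉ guessed ∧ c ∈ pvLETTERS then '_' else c) := by
  intro l
  induction l with
  | nil => intro acc; simp
  | cons c t ih =>
      intro acc
      simp only [List.foldl_cons, List.map_cons, ih]
      by_cases h : String.ofList [c] ∉ guessed ∧ c ∈ pvLETTERS <;> simp [h]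

-- membership in B's table is A's branch condition (conjuncts swapped)
theorem mem_table_iff (guessed : List String) (c : Char) :
    (c ∈ pvLETTERS.filter (fun c => String.ofList [c] ∉ guessed))
      ↔ (String.ofList [c] ∉ guessed ∧ c ∈ pvLETTERS) := by
  simp [List.mem_filter, and_comm]

-- ===== VERDICT (by name: the statement is the Claim_ definition above) =====
theorem obscurePhrase_spec : Claim_equal_obscurePhrase := by
  intro phrase guessed _
  unfold Spec_obscurePhrase obscurePhrase obscurePhrase_alt
  rw [obscure_foldl_eq_map]
  simp only [List.nil_append]
  congr 1
  apply List.map_congr_left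
  intro c _
  by_cases h : String.ofList [c] ∉ guessed ∧ c ∈ pvLETTERS
  · rw [if_pos h, if_pos ((mem_table_iff guessed c).mpr h)]
  · rw [if_neg h, if_neg (fun hc => h ((mem_table_iff guessed c).mp hc))]
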